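-- pv_equiv track=rewrite | github.com/ghluka/ICS3U1-Schoolwork | tasks/task3/task3_functions.py | domino_str
-- ===== SOURCE A (Python) =====
-- def domino_str(domino_1:int, domino_2:int) -> str:
--     """Returns a formatted string of two dominos side by side with the parameters being their respective amount of pips"""
--     # start grids
--     grid_row_1 = "|"
--     grid_row_2 = "|"
--     grid_row_3 = "|"
--
--     # loops through domino_1 and domino_2
--     for domino in f"{domino_1}{domino_2}":
--         domino = int(domino)
--
--         if domino == 2 or domino == 3:
--             grid_row_1 += "\u25cf    " # top-left pip
--             grid_row_3 += "    \u25cf" # bottom-right pip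
--         elif domino == 4 or domino == 5:
--             grid_row_1 += "\u25cf   \u25cf" # top-left and top-right pips
--             grid_row_3 += "\u25cf   \u25cf" # bottom-left and bottom-right pips
--         elif domino == 6:
--             grid_row_1 += "\u25cf \u25cf \u25cf" # top pips
--             grid_row_3 += "\u25cf \u25cf \u25cf" # bottom pips
--         else:
--             grid_row_1 += "     " # empty top
--             grid_row_3 += "     " # empty bottom
--
--         if domino == 1 or domino == 3 or domino == 5:
--             grid_row_2 += "  \u25cf  " # center pip
--         else:
--             grid_row_2 += "     " # empty middle
--
--         # close rows
--         grid_row_1 += "|"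
--         grid_row_2 += "|"
--         grid_row_3 += "|"
--
--     # top of dice
--     out = " " + "_" * 11 + " \n"
--
--     # add grids to return
--     out += f"{grid_row_1}\n{grid_row_2}\n{grid_row_3}\n"
--
--     # bottom of dice
--     out += " " + "\u203e" * 11 + " "
--
--     return out
-- ===== SOURCE B (Python) =====
-- def pip(n: int, r: int, c: int) -> bool:
--     """True iff face value n has a pip at grid position (row r, column c) of the 3x5 cell."""
--     if not 1 <= n <= 6:
--         return False
--     if r == 1:
--         return c == 2 and n % 2 == 1
--     col = c if r == 0 else 4 - c  # bottom row is the mirror image of the top row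
--     if col == 0:
--         return n >= 2
--     if col == 2:
--         return n == 6
--     if col == 4:
--         return n >= 4
--     return False
--
--
-- def domino_str(domino_1: int, domino_2: int) -> str:
--     """Returns a formatted string of two dominos side by side with the parameters being their respective amount of pips"""
--     digits = [int(ch) for ch in f"{domino_1}{domino_2}"]
--     rows = []
--     for r in range(3):
--         row = "|"
--         for n in digits:
--             for c in range(5):
--                 row += "\u25cf" if pip(n, r, c) else " "
--             row += "|"
--         rows.append(row)
--     return " " + "_" * 11 + " \n" + "\n".join(rows) + "\n" + " " + "\u203e" * 11 + " "
-- ===== Notes on version B (the rewrite author's own statement) =====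
-- stated objective: alternative
-- what changed: B renders each cell from a coordinate predicate pip(n,row,col) (with the bottom row as the mirror of the top) and traverses row-major (outer loop over the 3 rows, inner over digits and the 5 columns), instead of A's digit-major single pass concatenating fixed 5-character segments onto three accumulators via an if/elif chain.
import Mathlib
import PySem

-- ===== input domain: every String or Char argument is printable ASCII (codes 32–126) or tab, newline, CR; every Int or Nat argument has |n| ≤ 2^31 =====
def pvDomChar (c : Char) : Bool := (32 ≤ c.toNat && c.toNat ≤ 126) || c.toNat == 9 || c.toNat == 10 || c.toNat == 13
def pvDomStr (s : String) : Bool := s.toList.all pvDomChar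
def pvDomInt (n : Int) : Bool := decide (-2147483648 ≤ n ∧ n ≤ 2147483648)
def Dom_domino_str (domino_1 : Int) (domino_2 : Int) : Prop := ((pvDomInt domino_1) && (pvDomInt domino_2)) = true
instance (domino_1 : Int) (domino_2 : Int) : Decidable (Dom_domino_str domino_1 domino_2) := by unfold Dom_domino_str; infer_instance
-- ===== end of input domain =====

-- B renders each cell from a coordinate predicate pip(n,row,col) (bottom row = mirror of top),
-- traversing row-major (rows outer, digits and columns inner), instead of A's digit-major pass
-- concatenating fixed 5-char segments onto three accumulators (objective: alternative).

-- ===== PORT A =====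
-- A's loop: fold over the characters of f"{domino_1}{domino_2}", three row accumulators.
-- int(domino) is PySem.Int.ofChars?; the `.getD 0` arm is reached only when int() would
-- raise ValueError (the '-' of a negative input), which Pre_domino_str excludes.
def dominoStepA (st : List Char × List Char × List Char) (c : Char) :
    List Char × List Char × List Char :=
  let n : Int := (PySem.Int.ofChars? [c]).getD 0
  let r1 := st.1 ++ (if n = 2 ∨ n = 3 then ['●', ' ', ' ', ' ', ' ']
            else if n = 4 ∨ n = 5 then ['●', ' ', ' ', ' ', '●']
            else if n = 6 then ['●', ' ', '●', ' ', '●']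
            else [' ', ' ', ' ', ' ', ' '])
  let r3 := st.2.2 ++ (if n = 2 ∨ n = 3 then [' ', ' ', ' ', ' ', '●']
            else if n = 4 ∨ n = 5 then ['●', ' ', ' ', ' ', '●']
            else if n = 6 then ['●', ' ', '●', ' ', '●']
            else [' ', ' ', ' ', ' ', ' '])
  let r2 := st.2.1 ++ (if n = 1 ∨ n = 3 ∨ n = 5 then [' ', ' ', '●', ' ', ' ']
            else [' ', ' ', ' ', ' ', ' '])
  (r1 ++ ['|'], r2 ++ ['|'], r3 ++ ['|'])

def domino_str (domino_1 : Int) (domino_2 : Int) : String :=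
  let st := (PySem.Int.toChars domino_1 ++ PySem.Int.toChars domino_2).foldl
              dominoStepA (['|'], ['|'], ['|'])
  String.ofList ((' ' :: List.replicate 11 '_' ++ [' ', '\n'])
    ++ st.1 ++ ['\n'] ++ st.2.1 ++ ['\n'] ++ st.2.2 ++ ['\n']
    ++ (' ' :: List.replicate 11 '‾' ++ [' ']))

-- ===== PORT B =====
-- Source B's pip(n, r, c), step for step (n % 2 is PySem.Int.mod).
def pvPip (n : Int) (r : Int) (c : Int) : Bool :=
  if ¬ (1 ≤ n ∧ n ≤ 6) then false
  else if r = 1 then decide (c = 2 ∧ PySem.Int.mod n 2 = 1)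
  else
    let col := if r = 0 then c else 4 - c
    if col = 0 then decide (2 ≤ n)
    else if col = 2 then decide (n = 6)
    else if col = 4 then decide (4 ≤ n)
    else false

-- Source B's domino_str: digits once; then for r in range(3) build a row by looping over
-- digits and for c in range(5) appending '●'/' ' per pvPip, closing each cell with '|'.
def domino_str_alt (domino_1 : Int) (domino_2 : Int) : String :=
  let digits := (PySem.Int.toChars domino_1 ++ PySem.Int.toChars domino_2).map
      (fun ch => (PySem.Int.ofChars? [ch]).getD 0)
  let rows := (PySem.List.pyRange 0 3 1).map (fun r =>
    '|' :: (digits.map (fun n =>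
      ((PySem.List.pyRange 0 5 1).map (fun c => if pvPip n r c then '●' else ' '))
        ++ ['|'])).flatten)
  String.ofList ((' ' :: List.replicate 11 '_' ++ [' ', '\n'])
    ++ PySem.Chars.join ['\n'] rows ++ ['\n']
    ++ (' ' :: List.replicate 11 '‾' ++ [' ']))

-- ===== PRECONDITION & SPEC =====
-- Both A and B raise ValueError on a negative argument: int('-') fails on the sign character.
def Pre_domino_str (domino_1 : Int) (domino_2 : Int) : Prop :=
  0 ≤ domino_1 ∧ 0 ≤ domino_2
instance (domino_1 : Int) (domino_2 : Int) : Decidable (Pre_domino_str domino_1 domino_2) := by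
  unfold Pre_domino_str; infer_instance
def pvWitness_domino_str : Int × Int := (3, 60)

def Spec_domino_str (domino_1 : Int) (domino_2 : Int) (out : String) : Prop := out = domino_str_alt domino_1 domino_2
instance (domino_1 : Int) (domino_2 : Int) (out : String) : Decidable (Spec_domino_str domino_1 domino_2 out) := by unfold Spec_domino_str; infer_instance

-- ===== CLAIM (what is proved, stated in full; the proofs are below) =====
def Claim_equal_domino_str : Prop := ∀ (domino_1 : Int) (domino_2 : Int), Dom_domino_str domino_1 domino_2 → Pre_domino_str domino_1 domino_2 → Spec_domino_str domino_1 domino_2 (domino_str domino_1 domino_2)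

-- ===== LEMMAS AND PROOFS =====

-- the 5-character cell B renders for value n on row r
def cellB (n : Int) (r : Int) : List Char :=
  (PySem.List.pyRange 0 5 1).map (fun c => if pvPip n r c then '●' else ' ')

lemma pyRange5 : PySem.List.pyRange 0 5 1 = [0, 1, 2, 3, 4] := by decide
lemma pyRange3 : PySem.List.pyRange 0 3 1 = [0, 1, 2] := by decide

-- A's per-character segments are exactly B's coordinate-rendered cells, for EVERY
-- character (both sides render a failed/out-of-range int as an empty cell).
lemma stepA_eq_cell (st : List Char × List Char × List Char) (ch : Char) :
    dominoStepA st ch =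
      (st.1 ++ (cellB ((PySem.Int.ofChars? [ch]).getD 0) 0 ++ ['|']),
       st.2.1 ++ (cellB ((PySem.Int.ofChars? [ch]).getD 0) 1 ++ ['|']),
       st.2.2 ++ (cellB ((PySem.Int.ofChars? [ch]).getD 0) 2 ++ ['|'])) := by
  obtain ⟨r1, r2, r3⟩ := st
  unfold dominoStepA
  generalize (PySem.Int.ofChars? [ch]).getD 0 = n
  by_cases h1 : n = 1
  · subst h1; simp [cellB, pyRange5, pvPip, PySem.Int.mod]
  by_cases h2 : n = 2
  · subst h2; simp [cellB, pyRange5, pvPip, PySem.Int.mod]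
  by_cases h3 : n = 3
  · subst h3; simp [cellB, pyRange5, pvPip, PySem.Int.mod]
  by_cases h4 : n = 4
  · subst h4; simp [cellB, pyRange5, pvPip, PySem.Int.mod]
  by_cases h5 : n = 5
  · subst h5; simp [cellB, pyRange5, pvPip, PySem.Int.mod]
  by_cases h6 : n = 6
  · subst h6; simp [cellB, pyRange5, pvPip, PySem.Int.mod]
  · have hn : ¬ (1 ≤ n ∧ n ≤ 6) := by omega
    simp [cellB, pyRange5, pvPip, hn, h1, h2, h3, h4, h5, h6]

-- A's fold unrolls to three flattened per-character rows of B's cells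
lemma foldA_eq (l : List Char) : ∀ (r1 r2 r3 : List Char),
    l.foldl dominoStepA (r1, r2, r3) =
      (r1 ++ (l.map (fun ch => cellB ((PySem.Int.ofChars? [ch]).getD 0) 0 ++ ['|'])).flatten,
       r2 ++ (l.map (fun ch => cellB ((PySem.Int.ofChars? [ch]).getD 0) 1 ++ ['|'])).flatten,
       r3 ++ (l.map (fun ch => cellB ((PySem.Int.ofChars? [ch]).getD 0) 2 ++ ['|'])).flatten) := by
  induction l with
  | nil => intro r1 r2 r3; simp
  | cons c l ih =>
    intro r1 r2 r3
    simp only [List.foldl_cons, stepA_eq_cell, ih, List.map_cons, List.flatten_cons,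
      List.append_assoc]

-- ===== VERDICT (by name: the statement is the Claim_ definition above) =====
theorem domino_str_spec : Claim_equal_domino_str := by
  intro d1 d2 _ _
  unfold Spec_domino_str domino_str domino_str_alt
  rw [foldA_eq]
  simp only [pyRange3, List.map_cons, List.map_nil, List.map_map,
    PySem.Chars.join_cons_cons, PySem.Chars.join_singleton]
  simp [cellB, Function.comp_def, List.append_assoc]
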